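-- pv_equiv track=rewrite | github.com/dsc-sookmyung/2022-02-Algorithm-Study | 04-Queue-and-Deque/tlswldus03/D-5430.py | doFucns
-- ===== SOURCE A (Python) =====
-- from collections import deque
--
-- def doFucns(fucns, arr):
--   reverseFlag = 1
--   dq = deque(arr)
--   for fucn in fucns:
--     if(fucn == "R"):
--       reverseFlag *= (-1)
--     elif(fucn == "D"):
--       if(dq):
--         if(reverseFlag == 1):
--           dq.popleft()
--         else:
--           dq.pop()
--       else:
--         return "error"
--   if(reverseFlag == -1):
--     dq.reverse()
--   return "[" + ",".join(dq) + "]"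
-- ===== SOURCE B (Python) =====
-- def doFucns(fucns, arr):
--     direction = 1
--     front = 0
--     back = 0
--     n = len(arr)
--     for f in fucns:
--         if f == "R":
--             direction = -direction
--         elif f == "D":
--             if front + back == n:
--                 return "error"
--             if direction == 1:
--                 front += 1
--             else:
--                 back += 1
--     res = arr[front:n - back]
--     if direction == -1:
--         res.reverse()
--     return "[" + ",".join(res) + "]"
-- ===== Notes on version B (the rewrite author's own statement) =====
-- stated objective: simpler
-- what changed: B never builds or mutates a deque: it scans the command string once keeping only a direction flag and two counters of removals from each end, then materialises the surviving slice (reversed if needed) in one step.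
import Mathlib
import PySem

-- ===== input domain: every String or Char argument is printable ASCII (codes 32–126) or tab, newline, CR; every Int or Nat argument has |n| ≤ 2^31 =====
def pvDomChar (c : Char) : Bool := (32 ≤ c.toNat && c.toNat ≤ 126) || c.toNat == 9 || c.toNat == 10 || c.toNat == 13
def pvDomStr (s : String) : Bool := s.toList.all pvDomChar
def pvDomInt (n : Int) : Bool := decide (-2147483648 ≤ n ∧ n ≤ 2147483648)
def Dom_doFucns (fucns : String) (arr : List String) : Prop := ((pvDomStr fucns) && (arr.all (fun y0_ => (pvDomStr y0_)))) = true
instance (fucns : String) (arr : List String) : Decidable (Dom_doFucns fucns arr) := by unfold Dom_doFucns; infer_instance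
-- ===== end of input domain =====

-- B replaces A's mutable deque with a direction flag and two removal counters, slicing once at the end;
-- return values only are compared (neither version mutates the caller's list in Python).

-- ===== PORT A =====
-- loop state: (reverseFlag, dq); none = the early 'return "error"'
def doFucnsLoopA : List Char → Int → List String → Option (Int × List String)
  | [], flag, dq => some (flag, dq)
  | c :: cs, flag, dq =>
    if c = 'R' then doFucnsLoopA cs (flag * (-1)) dq
    else if c = 'D' then
      if dq ≠ [] then
        if flag = 1 then doFucnsLoopA cs flag dq.tail      -- dq.popleft()
        else doFucnsLoopA cs flag dq.dropLast              -- dq.pop()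
      else none
    else doFucnsLoopA cs flag dq

def doFucns (fucns : String) (arr : List String) : String :=
  match doFucnsLoopA fucns.toList 1 arr with
  | none => "error"
  | some (flag, dq) =>
    let dq := if flag = -1 then dq.reverse else dq
    "[" ++ PySem.Str.join "," dq ++ "]"

-- ===== PORT B =====
-- loop state: (direction, front, back); counters start at 0 and are only incremented while
-- front+back < n, so Nat is exact for Python's ints here; none = the early 'return "error"'
def doFucnsLoopB (n : Nat) : List Char → Int → Nat → Nat → Option (Int × Nat × Nat)
  | [], d, front, back => some (d, front, back)
  | c :: cs, d, front, back =>
    if c = 'R' then doFucnsLoopB n cs (-d) front back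
    else if c = 'D' then
      if front + back = n then none
      else if d = 1 then doFucnsLoopB n cs d (front + 1) back
      else doFucnsLoopB n cs d front (back + 1)
    else doFucnsLoopB n cs d front back

def doFucns_alt (fucns : String) (arr : List String) : String :=
  let n := arr.length
  match doFucnsLoopB n fucns.toList 1 0 0 with
  | none => "error"
  | some (d, front, back) =>
    -- arr[front : n - back] with 0 ≤ front, 0 ≤ n - back: exactly (arr.take (n-back)).drop front
    let res := (arr.take (n - back)).drop front
    let res := if d = -1 then res.reverse else res
    "[" ++ PySem.Str.join "," res ++ "]"

-- ===== PRECONDITION & SPEC =====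
def Spec_doFucns (fucns : String) (arr : List String) (out : String) : Prop := out = doFucns_alt fucns arr
instance (fucns : String) (arr : List String) (out : String) : Decidable (Spec_doFucns fucns arr out) := by unfold Spec_doFucns; infer_instance

-- ===== CLAIM (what is proved, stated in full; the proofs are below) =====
def Claim_equal_doFucns : Prop := ∀ (fucns : String) (arr : List String), Dom_doFucns fucns arr → Spec_doFucns fucns arr (doFucns fucns arr)

-- ===== LEMMAS AND PROOFS =====

-- the segment of arr that survives 'front' removals at the left and 'back' at the right
def pvSeg (arr : List String) (f b : Nat) : List String := (arr.take (arr.length - b)).drop f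

lemma pvSeg_ne_nil (arr : List String) (f b : Nat) (h : f + b < arr.length) :
    pvSeg arr f b ≠ [] := by
  have : (pvSeg arr f b).length = arr.length - b - f := by
    simp [pvSeg]
  intro hnil
  rw [hnil] at this
  simp at this
  omega

lemma pvSeg_tail (arr : List String) (f b : Nat) :
    (pvSeg arr f b).tail = pvSeg arr (f + 1) b := by
  simp [pvSeg, List.tail_drop]

lemma pvSeg_dropLast (arr : List String) (f b : Nat) (h : f + b < arr.length) :
    (pvSeg arr f b).dropLast = pvSeg arr f (b + 1) := by
  apply List.ext_getElem
  · simp [pvSeg]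
    omega
  · intro i h1 h2
    simp [pvSeg, List.getElem_dropLast]

-- the loop invariant: A's deque is exactly the surviving segment of arr
lemma pvLoops_agree (arr : List String) :
    ∀ (cs : List Char) (d : Int) (f b : Nat), f + b ≤ arr.length →
    doFucnsLoopA cs d (pvSeg arr f b)
      = Option.map (fun p : Int × Nat × Nat => (p.1, pvSeg arr p.2.1 p.2.2))
          (doFucnsLoopB arr.length cs d f b) := by
  intro cs
  induction cs with
  | nil => intro d f b _; simp [doFucnsLoopA, doFucnsLoopB]
  | cons c cs ih =>
    intro d f b hfb
    by_cases hR : c = 'R'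
    · simp only [doFucnsLoopA, doFucnsLoopB, hR]
      rw [show d * (-1) = -d by ring]
      exact ih (-d) f b hfb
    · by_cases hD : c = 'D'
      · simp only [doFucnsLoopA, doFucnsLoopB, hD]
        by_cases hemp : f + b = arr.length
        · have : pvSeg arr f b = [] := by
            unfold pvSeg
            have : arr.length - b ≤ f := by omega
            simp [List.drop_eq_nil_iff]
            omega
          simp [this, hemp]
        · have hlt : f + b < arr.length := lt_of_le_of_ne hfb hemp
          have hne : pvSeg arr f b ≠ [] := pvSeg_ne_nil arr f b hlt
          rw [if_pos hne, if_neg hemp]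
          by_cases hd : d = 1
          · rw [if_pos hd, if_pos hd, pvSeg_tail]
            exact ih d (f + 1) b (by omega)
          · rw [if_neg hd, if_neg hd, pvSeg_dropLast arr f b hlt]
            exact ih d f (b + 1) (by omega)
      · simp only [doFucnsLoopA, doFucnsLoopB, if_neg hR, if_neg hD]
        exact ih d f b hfb

lemma pvSeg_zero (arr : List String) : pvSeg arr 0 0 = arr := by
  simp [pvSeg]

-- ===== VERDICT (by name: the statement is the Claim_ definition above) =====
theorem doFucns_spec : Claim_equal_doFucns := by
  intro fucns arr _
  unfold Spec_doFucns doFucns doFucns_alt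
  have h := pvLoops_agree arr fucns.toList 1 0 0 (by omega)
  rw [pvSeg_zero] at h
  rw [h]
  rcases hB : doFucnsLoopB arr.length fucns.toList 1 0 0 with _ | ⟨d, f, b⟩ <;>
    simp [hB, pvSeg]
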